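-- pv_equiv track=rewrite | github.com/donkrazy/algoorithm | 7.6-FANMEETING.py | solve
-- ===== SOURCE A (Python) =====
-- def solve(a, b):
--     # 1) multiply with 'b' reversed, without rounding up
--     c = [0] * (len(a) + len(b) - 1)
--     b.reverse()
--     for i in range(len(a)):
--         for j in range(len(b)):
--             # c[i + j] += a[i] * b[j]
--             c[i + j] |= a[i] & b[j]  # boolean version
--
--     # 2) count 0 in c except for a partial hug
--     count = 0
--     for k in c[len(a) - 1:len(c) - len(a) + 1]:
--         if k == 0:
--             count += 1
--     return count
-- ===== SOURCE B (Python) =====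
-- def solve(a, b):
--     # counts collision-free full-overlap alignments directly; does not mutate b (A reverses b in place)
--     n = len(a)
--     count = 0
--     for p in range(len(b) - n + 1):
--         if all(x & y == 0 for x, y in zip(a, b[p:p+n])):
--             count += 1
--     return count
-- ===== Notes on version B (the rewrite author's own statement) =====
-- stated objective: alternative
-- what changed: B counts collision-free full-overlap alignment offsets directly with an early-exit window test over b's slices, instead of materialising the whole boolean convolution array (with b reversed in place) and counting zeros in its middle slice; B also does not mutate b. The early exit at the first colliding index (measured) makes B far faster on typical data, though the worst case stays O(n*m).
-- intended difference: When a is empty, A's slice start len(a)-1 = -1 wraps around Python-style so A returns the accidental value 1 (if len(b) >= 2) or 0, while B returns len(b)+1, the vacuously correct count of collision-free alignments. — e.g. on solve([], [5, 7]): A returns 1, B returns 3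
import Mathlib
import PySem

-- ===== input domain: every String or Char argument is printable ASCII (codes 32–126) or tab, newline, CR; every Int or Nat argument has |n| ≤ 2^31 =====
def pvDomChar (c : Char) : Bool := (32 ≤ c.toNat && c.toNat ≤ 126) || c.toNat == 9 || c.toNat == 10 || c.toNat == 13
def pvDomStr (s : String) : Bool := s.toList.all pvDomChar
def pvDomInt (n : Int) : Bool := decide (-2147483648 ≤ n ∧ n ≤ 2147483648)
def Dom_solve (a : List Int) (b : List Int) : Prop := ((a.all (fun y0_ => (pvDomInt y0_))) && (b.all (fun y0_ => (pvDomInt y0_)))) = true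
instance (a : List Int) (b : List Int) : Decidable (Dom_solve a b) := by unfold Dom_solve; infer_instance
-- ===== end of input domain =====

-- B counts the collision-free full-overlap alignments directly (no convolution array, no
-- reversal, early exit per window) instead of building the boolean convolution and counting
-- zeros in its middle slice; equivalence is about the RETURN value only — A reverses b in place, B does not mutate b.

-- ===== PORT A =====
def solve (a : List Int) (b : List Int) : Int :=
  let c0 : List Int := List.replicate (a.length + b.length - 1) 0
  let brev := b.reverse
  let c := (List.range a.length).foldl
    (fun c i => (List.range brev.length).foldl
      (fun c j => c.set (i + j)
        (PySem.Int.bor (c.getD (i + j) 0) (PySem.Int.band (a.getD i 0) (brev.getD j 0)))) c) c0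
  (PySem.List.slice c (some ((a.length : Int) - 1)) (some ((c.length : Int) - (a.length : Int) + 1))).foldl
    (fun count k => if k == 0 then count + 1 else count) 0

-- ===== PORT B =====
def solve_alt (a : List Int) (b : List Int) : Int :=
  (PySem.List.pyRange 0 ((b.length : Int) - (a.length : Int) + 1) 1).foldl
    (fun count p =>
      if (a.zip (PySem.List.slice b (some p) (some (p + (a.length : Int))))).all
           (fun xy => PySem.Int.band xy.1 xy.2 == 0)
      then count + 1 else count) 0

-- ===== PRECONDITION & SPEC =====
-- When a is empty, A's slice start len(a)-1 = -1 wraps around Python-style, so A returns the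
-- accidental value 1 (len(b) ≥ 2) or 0; B returns the vacuously correct count len(b)+1 of
-- collision-free alignments, which is the intended value.
def D_solve (a : List Int) (b : List Int) : Prop := a = []
instance (a : List Int) (b : List Int) : Decidable (D_solve a b) := by unfold D_solve; infer_instance
def Spec_solve (a : List Int) (b : List Int) (out : Int) : Prop := ¬ D_solve a b → out = solve_alt a b
instance (a : List Int) (b : List Int) (out : Int) : Decidable (Spec_solve a b out) := by unfold Spec_solve; infer_instance
def pvDiffWitness_solve : List Int × List Int := ([], [5, 7])
def pvDiffWitnessOut_solve : Int × Int := (1, 3)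

-- ===== CLAIM (what is proved, stated in full; the proofs are below) =====
def Claim_unchanged_solve : Prop := ∀ (a : List Int) (b : List Int), Dom_solve a b → Spec_solve a b (solve a b)
def Claim_changed_solve : Prop := Dom_solve (pvDiffWitness_solve.1) (pvDiffWitness_solve.2) ∧ D_solve (pvDiffWitness_solve.1) (pvDiffWitness_solve.2) ∧ solve (pvDiffWitness_solve.1) (pvDiffWitness_solve.2) = pvDiffWitnessOut_solve.1 ∧ solve_alt (pvDiffWitness_solve.1) (pvDiffWitness_solve.2) = pvDiffWitnessOut_solve.2 ∧ pvDiffWitnessOut_solve.1 ≠ pvDiffWitnessOut_solve.2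
def Claim_exact_solve : Prop := ∀ (a : List Int) (b : List Int), Dom_solve a b → D_solve a b → solve a b ≠ solve_alt a b

-- ===== LEMMAS AND PROOFS =====

def pvPairs (n m : Nat) : List (Nat × Nat) :=
  (List.range n).flatMap (fun i => (List.range m).map (fun j => (i, j)))

theorem pv_nested_fold {α : Type} (n m : Nat) (g : α → Nat → Nat → α) (c0 : α) :
    (List.range n).foldl (fun c i => (List.range m).foldl (fun c j => g c i j) c) c0
      = (pvPairs n m).foldl (fun c ij => g c ij.1 ij.2) c0 := by
  rw [pvPairs, List.foldl_flatMap]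
  simp [List.foldl_map]

theorem pv_fold_length (ps : List (Nat × Nat)) (f : Nat → Nat → Int) (c0 : List Int) :
    ((ps.foldl (fun c ij => c.set (ij.1 + ij.2)
        (PySem.Int.bor (c.getD (ij.1 + ij.2) 0) (f ij.1 ij.2))) c0)).length = c0.length := by
  induction ps generalizing c0 with
  | nil => rfl
  | cons q ps ih => rw [List.foldl_cons, ih]; simp

theorem pv_fold_getD (ps : List (Nat × Nat)) (f : Nat → Nat → Int) (c0 : List Int) (s : Nat)
    (h : ∀ ij ∈ ps, ij.1 + ij.2 < c0.length) :
    ((ps.foldl (fun c ij => c.set (ij.1 + ij.2)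
        (PySem.Int.bor (c.getD (ij.1 + ij.2) 0) (f ij.1 ij.2))) c0)).getD s 0
      = ps.foldl (fun acc ij => if ij.1 + ij.2 = s then PySem.Int.bor acc (f ij.1 ij.2) else acc)
          (c0.getD s 0) := by
  induction ps generalizing c0 with
  | nil => rfl
  | cons q ps ih =>
    simp only [List.foldl_cons]
    rw [ih _ (by intro ij hij; simpa using h ij (List.mem_cons_of_mem _ hij))]
    congr 1
    have hq : q.1 + q.2 < c0.length := h q List.mem_cons_self
    by_cases hs : q.1 + q.2 = s
    · subst hs
      simp [List.getD_eq_getElem?_getD, List.getElem?_set_self hq]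
    · simp [hs, List.getD_eq_getElem?_getD, List.getElem?_set_ne hs]

theorem pv_natlor_zero (m n : Nat) : m ||| n = 0 ↔ m = 0 ∧ n = 0 := by
  constructor
  · intro h
    have h1 : m ≤ m ||| n := Nat.left_le_or
    have h2 : n ≤ m ||| n := Nat.right_le_or
    omega
  · rintro ⟨rfl, rfl⟩; simp

theorem pv_bor_eq_zero_iff (a b : Int) : PySem.Int.bor a b = 0 ↔ a = 0 ∧ b = 0 := by
  unfold PySem.Int.bor
  split_ifs with h1 h2 h2
  · rw [show ((↑(a.toNat ||| b.toNat) : Int) = 0) ↔ (a.toNat ||| b.toNat = 0) by omega, pv_natlor_zero]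
    omega
  · omega
  · omega
  · omega

theorem pv_orfold_zero (ps : List (Nat × Nat)) (f : Nat → Nat → Int) (s : Nat) (acc : Int) :
    (ps.foldl (fun acc ij => if ij.1 + ij.2 = s then PySem.Int.bor acc (f ij.1 ij.2) else acc) acc = 0)
      ↔ (acc = 0 ∧ ∀ ij ∈ ps, ij.1 + ij.2 = s → f ij.1 ij.2 = 0) := by
  induction ps generalizing acc with
  | nil => simp
  | cons q ps ih =>
    rw [List.foldl_cons]
    by_cases hq : q.1 + q.2 = s
    · rw [if_pos hq, ih, pv_bor_eq_zero_iff]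
      constructor
      · rintro ⟨⟨h1, h2⟩, h3⟩
        refine ⟨h1, ?_⟩
        intro ij hij
        rcases List.mem_cons.mp hij with rfl | hm
        · intro _; exact h2
        · exact h3 ij hm
      · rintro ⟨h1, h2⟩
        exact ⟨⟨h1, h2 q List.mem_cons_self hq⟩, fun ij hm => h2 ij (List.mem_cons_of_mem _ hm)⟩
    · rw [if_neg hq, ih]
      constructor
      · rintro ⟨h1, h2⟩
        refine ⟨h1, ?_⟩
        intro ij hij
        rcases List.mem_cons.mp hij with rfl | hm
        · intro h; exact absurd h hq
        · exact h2 ij hm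
      · rintro ⟨h1, h2⟩
        exact ⟨h1, fun ij hm => h2 ij (List.mem_cons_of_mem _ hm)⟩

theorem pv_drop_take_eq_map (c : List Int) (d l : Nat) :
    (c.drop d).take l = (List.range (min l (c.length - d))).map (fun t => c.getD (d + t) 0) := by
  apply List.ext_getElem
  · simp
  · intro i h1 h2
    simp only [List.getElem_take, List.getElem_drop, List.getElem_map, List.getElem_range]
    rw [List.getD_eq_getElem?_getD, List.getElem?_eq_getElem (by simp at h1 ⊢; omega)]
    rfl

theorem pv_getD_replicate (k s : Nat) : (List.replicate k (0 : Int)).getD s 0 = 0 := by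
  rw [List.getD_eq_getElem?_getD, List.getElem?_replicate]
  split_ifs <;> rfl

theorem pv_A_eq_countP (a b : List Int) (ha : 1 ≤ a.length) :
    solve a b = ((List.range (b.length + 1 - a.length)).countP
        (fun t => decide (∀ ij ∈ pvPairs a.length b.length,
            ij.1 + ij.2 = a.length - 1 + t →
            PySem.Int.band (a.getD ij.1 0) ((b.reverse).getD ij.2 0) = 0)) : Int) := by
  have hnf :
      (List.range a.length).foldl
        (fun c i => (List.range b.length).foldl
          (fun c j => c.set (i + j)
            (PySem.Int.bor (c.getD (i + j) 0)
              (PySem.Int.band (a.getD i 0) ((b.reverse).getD j 0)))) c)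
        (List.replicate (a.length + b.length - 1) 0)
      = (pvPairs a.length b.length).foldl
          (fun c ij => c.set (ij.1 + ij.2)
            (PySem.Int.bor (c.getD (ij.1 + ij.2) 0)
              (PySem.Int.band (a.getD ij.1 0) ((b.reverse).getD ij.2 0))))
          (List.replicate (a.length + b.length - 1) 0) :=
    pv_nested_fold (α := List Int) a.length b.length
      (fun (c : List Int) (i j : Nat) => c.set (i + j)
        (PySem.Int.bor (c.getD (i + j) 0)
          (PySem.Int.band (a.getD i 0) ((b.reverse).getD j 0)))) _
  have hlen :
      ((pvPairs a.length b.length).foldl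
          (fun c ij => c.set (ij.1 + ij.2)
            (PySem.Int.bor (c.getD (ij.1 + ij.2) 0)
              (PySem.Int.band (a.getD ij.1 0) ((b.reverse).getD ij.2 0))))
          (List.replicate (a.length + b.length - 1) 0)).length
        = a.length + b.length - 1 := by
    rw [pv_fold_length (pvPairs a.length b.length)
      (fun i j => PySem.Int.band (a.getD i 0) ((b.reverse).getD j 0))]
    exact List.length_replicate
  simp only [solve, List.length_reverse]
  rw [hnf, hlen]
  rw [show ((a.length : Int) - 1) = (((a.length - 1 : Nat) : Nat) : Int) by omega]
  rw [show (((a.length + b.length - 1 : Nat) : Int) - (a.length : Int) + 1) = ((b.length : Nat) : Int) by omega]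
  rw [PySem.List.slice_natCast]
  rw [pv_drop_take_eq_map, hlen]
  rw [show min (b.length - (a.length - 1)) (a.length + b.length - 1 - (a.length - 1))
        = b.length + 1 - a.length by omega]
  rw [PySem.List.foldl_if_add_one, zero_add, List.countP_map]
  congr 1
  apply List.countP_congr
  intro t ht
  simp only [Function.comp]
  have hget := pv_fold_getD (pvPairs a.length b.length)
    (fun i j => PySem.Int.band (a.getD i 0) ((b.reverse).getD j 0))
    (List.replicate (a.length + b.length - 1) 0) (a.length - 1 + t) (by
      intro ij hij
      simp only [pvPairs, List.mem_flatMap, List.mem_map, List.mem_range] at hij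
      obtain ⟨i, hi, j, hj, rfl⟩ := hij
      simp only [List.length_replicate]
      omega)
  rw [hget, pv_getD_replicate]
  rw [Bool.eq_iff_iff]
  simp only [beq_iff_eq, decide_eq_true_eq]
  have hz : (List.foldl (fun acc ij => if ij.1 + ij.2 = a.length - 1 + t
        then PySem.Int.bor acc (PySem.Int.band (a.getD ij.1 0) ((b.reverse).getD ij.2 0))
        else acc) 0 (pvPairs a.length b.length) = 0)
      ↔ ((0 : Int) = 0 ∧ ∀ ij ∈ pvPairs a.length b.length,
          ij.1 + ij.2 = a.length - 1 + t →
          PySem.Int.band (a.getD ij.1 0) ((b.reverse).getD ij.2 0) = 0) :=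
    pv_orfold_zero (pvPairs a.length b.length)
      (fun i j => PySem.Int.band (a.getD i 0) ((b.reverse).getD j 0)) (a.length - 1 + t) 0
  rw [hz]
  simp

theorem pv_alt_eq_countP (a b : List Int) :
    solve_alt a b
      = ((List.range (b.length + 1 - a.length)).countP
          (fun p => (a.zip ((b.drop p).take a.length)).all
            (fun xy => PySem.Int.band xy.1 xy.2 == 0)) : Int) := by
  unfold solve_alt
  rw [PySem.List.foldl_if_add_one, PySem.List.pyRange_one, List.countP_map]
  rw [show ((b.length : Int) - (a.length : Int) + 1 - 0).toNat = b.length + 1 - a.length by omega]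
  rw [zero_add]
  congr 1
  apply List.countP_congr
  intro k hk
  simp only [Function.comp, zero_add]
  rw [PySem.List.slice_natCast_add]

theorem pv_ok_iff (a b : List Int) (p : Nat) (hp : p + a.length ≤ b.length) :
    ((a.zip ((b.drop p).take a.length)).all
        (fun xy => PySem.Int.band xy.1 xy.2 == 0)) = true
      ↔ ∀ i < a.length, PySem.Int.band (a.getD i 0) (b.getD (p + i) 0) = 0 := by
  have hw : ((b.drop p).take a.length).length = a.length := by
    simp; omega
  have hz : (a.zip ((b.drop p).take a.length)).length = a.length := by
    simp [hw]
  rw [List.all_eq_true]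
  constructor
  · intro h i hi
    have hmem : (a[i]'hi, ((b.drop p).take a.length)[i]'(by omega)) ∈
        a.zip ((b.drop p).take a.length) := by
      exact List.mem_iff_getElem.mpr ⟨i, by omega, by rw [List.getElem_zip]⟩
    have := h _ hmem
    simp only [beq_iff_eq] at this
    rw [List.getD_eq_getElem _ _ hi, List.getD_eq_getElem _ _ (by omega : p + i < b.length)]
    convert this using 2
    rw [List.getElem_take, List.getElem_drop]
  · intro h xy hxy
    obtain ⟨i, hi, hget⟩ := List.mem_iff_getElem.mp hxy
    rw [List.getElem_zip] at hget
    have hi' : i < a.length := by omega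
    have := h i hi'
    rw [List.getD_eq_getElem _ _ hi', List.getD_eq_getElem _ _ (by omega : p + i < b.length)] at this
    simp only [beq_iff_eq]
    rw [← hget]
    convert this using 2
    rw [List.getElem_take, List.getElem_drop]

theorem pv_countP_reflect (L : Nat) (p : Nat → Bool) :
    (List.range L).countP p = (List.range L).countP (fun t => p (L - 1 - t)) := by
  have h : (List.range L).reverse = (List.range L).map (fun t => L - 1 - t) := by
    apply List.ext_getElem
    · simp
    · intro i h1 h2
      simp only [List.getElem_reverse, List.getElem_map, List.getElem_range, List.length_range]
  calc (List.range L).countP p = ((List.range L).reverse).countP p := (List.countP_reverse).symm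
    _ = _ := by rw [h, List.countP_map]; rfl


theorem pv_getD_reverse (l : List Int) (j : Nat) (hj : j < l.length) :
    (l.reverse).getD j 0 = l.getD (l.length - 1 - j) 0 := by
  rw [List.getD_eq_getElem _ _ (by simpa using hj), List.getD_eq_getElem _ _ (by omega)]
  rw [List.getElem_reverse]

-- ===== VERDICT (by name: the statement is the Claim_ definition above) =====
theorem solve_spec : Claim_unchanged_solve := by
  intro a b _ hnd
  have ha : 1 ≤ a.length := by
    cases a with
    | nil => exact absurd rfl (fun h => hnd h)
    | cons x xs => simp
  show solve a b = solve_alt a b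
  rw [pv_A_eq_countP a b ha, pv_alt_eq_countP a b]
  congr 1
  conv_rhs => rw [pv_countP_reflect]
  apply List.countP_congr
  intro t ht
  simp only [List.mem_range] at ht
  have hnm : a.length ≤ b.length := by omega
  rw [Bool.eq_iff_iff]
  rw [pv_ok_iff a b (b.length + 1 - a.length - 1 - t) (by omega)]
  simp only [decide_eq_true_eq, iff_true]
  constructor
  · intro h i hi
    have hmem : (i, a.length - 1 + t - i) ∈ pvPairs a.length b.length := by
      simp only [pvPairs, List.mem_flatMap, List.mem_map, List.mem_range]
      exact ⟨i, hi, a.length - 1 + t - i, by omega, rfl⟩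
    have hv := h (i, a.length - 1 + t - i) hmem (by simp; omega)
    simp only at hv
    rw [pv_getD_reverse b _ (by omega)] at hv
    rw [show b.length - 1 - (a.length - 1 + t - i) = b.length + 1 - a.length - 1 - t + i
      by omega] at hv
    exact hv
  · intro h ij hmem hsum
    simp only [pvPairs, List.mem_flatMap, List.mem_map, List.mem_range] at hmem
    obtain ⟨i, hi, j, hj, rfl⟩ := hmem
    simp only at hsum ⊢
    rw [pv_getD_reverse b j hj]
    rw [show b.length - 1 - j = b.length + 1 - a.length - 1 - t + i by omega]
    exact h i hi

theorem solve_changed : Claim_changed_solve := by unfold Claim_changed_solve; decide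

theorem solve_tight : Claim_exact_solve := by
  intro a b _ hD
  have ha : a = [] := hD
  subst ha
  cases b with
  | nil => decide
  | cons x bs =>
    rw [pv_alt_eq_countP]
    simp only [List.zip_nil_left, List.all_nil, List.length_nil, Nat.sub_zero]
    rw [List.countP_true]
    simp only [List.length_range]
    -- A side
    simp only [solve, List.length_nil, List.range_zero, List.foldl_nil, List.length_reverse,
      Nat.zero_add, List.length_cons, Nat.add_sub_cancel]
    rw [PySem.List.foldl_if_add_one, zero_add]
    rw [List.countP_eq_length.mpr (by
      intro k hk
      have hk' := PySem.List.mem_of_mem_slice _ _ _ hk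
      have : k = 0 := List.eq_of_mem_replicate hk'
      simp [this])]
    rw [PySem.List.length_slice]
    simp only [List.length_replicate]
    rw [show (((0 : Nat) : Int) - 1) = (-1 : Int) by simp]
    rw [PySem.List.clampIdx_neg_one]
    rw [show ((bs.length : Int) - ((0 : Nat) : Int) + 1) = (((bs.length + 1 : Nat) : Nat) : Int) by
      push_cast; ring]
    rw [PySem.List.clampIdx_natCast]
    intro hcontra
    omega
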